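-- pv_equiv track=rewrite | github.com/jerome-leonard-dev/AoC | 2023/day1/day1-2.py | getFirstDigitIn
-- ===== SOURCE A (Python) =====
-- digits = ["1","2","3","4","5","6","7","8","9","one","two","three","four","five","six","seven","eight","nine"]
--
-- def getFirstDigitIn(line):
--     position = 99999
--     result = ""
--     for digit in digits:
--         digitPosition = line.find(digit)
--         if digitPosition>=0 and digitPosition<position:
--             position = digitPosition
--             result=digit
--     return result
-- ===== SOURCE B (Python) =====
-- WORDS = ("one", "two", "three", "four", "five", "six", "seven", "eight", "nine")
--
-- def getFirstDigitIn(line):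
--     i = 0
--     n = len(line)
--     while i < n:
--         c = line[i]
--         if '1' <= c <= '9':
--             return c
--         w = next((w for w in WORDS if line.startswith(w, i)), None)
--         if w is not None:
--             return w
--         i += 1
--     return ""
-- ===== Notes on version B (the rewrite author's own statement) =====
-- stated objective: alternative
-- what changed: B scans positions left-to-right and returns the first digit char or number-word starting there, instead of A's per-token line.find scan with a running minimum position; Pre_ excludes lines whose earliest token starts at index 99999 or later (so at least 100000 characters long), where A's position sentinel 99999 masks the token and A returns the empty string while B returns that token (no such input fits the cite literal limit).
import Mathlib
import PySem

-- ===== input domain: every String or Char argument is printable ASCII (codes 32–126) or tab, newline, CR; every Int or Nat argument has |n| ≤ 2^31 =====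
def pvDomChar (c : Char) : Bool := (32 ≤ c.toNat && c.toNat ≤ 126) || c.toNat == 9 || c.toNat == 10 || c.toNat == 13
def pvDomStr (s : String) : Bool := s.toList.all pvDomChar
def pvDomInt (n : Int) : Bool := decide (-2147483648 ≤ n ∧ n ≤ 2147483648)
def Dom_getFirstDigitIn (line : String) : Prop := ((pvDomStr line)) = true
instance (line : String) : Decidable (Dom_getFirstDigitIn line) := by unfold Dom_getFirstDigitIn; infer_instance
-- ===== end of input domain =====

-- B scans positions left-to-right, returning the first digit char or number-word found there (alternative
-- decomposition, same cost).  Pre_ excludes lines whose earliest token starts at index >= 99999, where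
-- A's 99999 position sentinel masks the token (A returns "", B returns the token); see Pre_getFirstDigitIn.


-- ===== PORT A =====
def pyDigits : List String :=
  ["1","2","3","4","5","6","7","8","9",
   "one","two","three","four","five","six","seven","eight","nine"]

def getFirstDigitIn (line : String) : String :=
  (pyDigits.foldl
    (fun st digit =>
      let digitPosition := PySem.Str.find line digit
      if 0 ≤ digitPosition ∧ digitPosition < st.1 then (digitPosition, digit) else st)
    ((99999 : Int), "")).2

-- ===== PORT B =====
def altWords : List String :=
  ["one","two","three","four","five","six","seven","eight","nine"]

-- the `while i < n` loop of Source B; line.startswith(w, i) with 0 ≤ i ≤ n is exactly a prefix test on line[i:]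
def altGo (line : List Char) (n : Nat) (i : Nat) : String :=
  if _h : i < n then
    let c := line.getD i ' '
    if '1' ≤ c ∧ c ≤ '9' then String.ofList [c]
    else
      match altWords.find? (fun w => PySem.Chars.startswith (line.drop i) w.toList) with
      | some w => w
      | none => altGo line n (i + 1)
  else ""
termination_by n - i

def getFirstDigitIn_alt (line : String) : String :=
  altGo line.toList line.toList.length 0

-- ===== PRECONDITION & SPEC =====
-- Pre_ excludes lines whose earliest digit-or-word token starts at index 99999 or later: there A's
-- position sentinel (initial position = 99999) masks the token and A returns "" although a token occurs,
-- an artefact of the sentinel that B's natural scan does not reproduce (B returns that first token).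
-- Every line shorter than 100000 characters satisfies Pre_.
def Pre_getFirstDigitIn (line : String) : Prop :=
  (∃ i < min 99999 line.toList.length, ∃ t ∈ pyDigits, t.toList <+: line.toList.drop i) ∨
  (∀ i < line.toList.length, ∀ t ∈ pyDigits, ¬ t.toList <+: line.toList.drop i)

instance (line : String) : Decidable (Pre_getFirstDigitIn line) := by
  unfold Pre_getFirstDigitIn; infer_instance

def pvWitness_getFirstDigitIn : String := "xtwone3"

def Spec_getFirstDigitIn (line : String) (out : String) : Prop := out = getFirstDigitIn_alt line
instance (line : String) (out : String) : Decidable (Spec_getFirstDigitIn line out) := by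
  unfold Spec_getFirstDigitIn; infer_instance

-- ===== CLAIM (what is proved, stated in full; the proofs are below) =====
def Claim_equal_getFirstDigitIn : Prop := ∀ (line : String), Dom_getFirstDigitIn line → Pre_getFirstDigitIn line → Spec_getFirstDigitIn line (getFirstDigitIn line)

-- ===== LEMMAS AND PROOFS =====

-- ---- small decidable facts about the token lists ----
set_option maxRecDepth 4096

def digitChars : List Char := ['1','2','3','4','5','6','7','8','9']
def charWords : List (List Char) :=
  [['o','n','e'],['t','w','o'],['t','h','r','e','e'],['f','o','u','r'],['f','i','v','e'],
   ['s','i','x'],['s','e','v','e','n'],['e','i','g','h','t'],['n','i','n','e']]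
def charTokens : List (List Char) :=
  [['1'],['2'],['3'],['4'],['5'],['6'],['7'],['8'],['9'],
   ['o','n','e'],['t','w','o'],['t','h','r','e','e'],['f','o','u','r'],['f','i','v','e'],
   ['s','i','x'],['s','e','v','e','n'],['e','i','g','h','t'],['n','i','n','e']]

theorem hmapD : pyDigits.map String.toList = charTokens := rfl
theorem hmapW : altWords.map String.toList = charWords := rfl

theorem toList_inj {s t : String} (h : s.toList = t.toList) : s = t := by
  rw [← String.ofList_toList (s := s), h, String.ofList_toList]

theorem toList_mem_charTokens {t : String} (h : t ∈ pyDigits) : t.toList ∈ charTokens := by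
  rw [← hmapD]; exact List.mem_map.mpr ⟨t, h, rfl⟩
theorem toList_mem_charWords {w : String} (h : w ∈ altWords) : w.toList ∈ charWords := by
  rw [← hmapW]; exact List.mem_map.mpr ⟨w, h, rfl⟩
theorem of_charTokens_mem {l : List Char} (h : l ∈ charTokens) : ∃ t ∈ pyDigits, t.toList = l := by
  rw [← hmapD] at h
  obtain ⟨t, ht, rfl⟩ := List.mem_map.mp h
  exact ⟨t, ht, rfl⟩
theorem of_charWords_mem {l : List Char} (h : l ∈ charWords) : ∃ w ∈ altWords, w.toList = l := by
  rw [← hmapW] at h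
  obtain ⟨w, hw, rfl⟩ := List.mem_map.mp h
  exact ⟨w, hw, rfl⟩

theorem mem_charTokens_cases {l : List Char} (h : l ∈ charTokens) :
    l = ['1'] ∨ l = ['2'] ∨ l = ['3'] ∨ l = ['4'] ∨ l = ['5'] ∨ l = ['6'] ∨ l = ['7'] ∨ l = ['8'] ∨ l = ['9'] ∨ l = ['o','n','e'] ∨ l = ['t','w','o'] ∨ l = ['t','h','r','e','e'] ∨ l = ['f','o','u','r'] ∨ l = ['f','i','v','e'] ∨ l = ['s','i','x'] ∨ l = ['s','e','v','e','n'] ∨ l = ['e','i','g','h','t'] ∨ l = ['n','i','n','e'] := by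
  simpa [charTokens, List.mem_cons] using h
theorem mem_charWords_cases {l : List Char} (h : l ∈ charWords) :
    l = ['o','n','e'] ∨ l = ['t','w','o'] ∨ l = ['t','h','r','e','e'] ∨ l = ['f','o','u','r'] ∨ l = ['f','i','v','e'] ∨ l = ['s','i','x'] ∨ l = ['s','e','v','e','n'] ∨ l = ['e','i','g','h','t'] ∨ l = ['n','i','n','e'] := by
  simpa [charWords, List.mem_cons] using h
theorem ctoks_ne_nil : ∀ l ∈ charTokens, l ≠ [] := by
  intro l hl; rcases mem_charTokens_cases hl with rfl|rfl|rfl|rfl|rfl|rfl|rfl|rfl|rfl|rfl|rfl|rfl|rfl|rfl|rfl|rfl|rfl|rfl <;> decide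
theorem ctoks_prefix_free :
    ∀ l1 ∈ charTokens, ∀ l2 ∈ charTokens, l1 <+: l2 → l1 = l2 := by
  intro l1 h1 l2 h2
  rcases mem_charTokens_cases h1 with rfl|rfl|rfl|rfl|rfl|rfl|rfl|rfl|rfl|rfl|rfl|rfl|rfl|rfl|rfl|rfl|rfl|rfl <;>
    rcases mem_charTokens_cases h2 with rfl|rfl|rfl|rfl|rfl|rfl|rfl|rfl|rfl|rfl|rfl|rfl|rfl|rfl|rfl|rfl|rfl|rfl <;> decide
theorem cwords_sub : ∀ l ∈ charWords, l ∈ charTokens := by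
  intro l hl; rcases mem_charWords_cases hl with rfl|rfl|rfl|rfl|rfl|rfl|rfl|rfl|rfl <;>
    simp [charTokens]
theorem ctoks_shape :
    ∀ l ∈ charTokens, l ∈ charWords ∨ ∃ c ∈ digitChars, l = [c] := by
  intro l hl; rcases mem_charTokens_cases hl with rfl|rfl|rfl|rfl|rfl|rfl|rfl|rfl|rfl|rfl|rfl|rfl|rfl|rfl|rfl|rfl|rfl|rfl <;>
    first
      | exact Or.inl (by decide)
      | exact Or.inr ⟨_, by decide, rfl⟩
theorem mem_digitChars_cases {c : Char} (h : c ∈ digitChars) :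
    c = '1' ∨ c = '2' ∨ c = '3' ∨ c = '4' ∨ c = '5' ∨ c = '6' ∨ c = '7' ∨ c = '8' ∨ c = '9' := by
  simpa [digitChars, List.mem_cons] using h
theorem digitChars_bounds : ∀ c ∈ digitChars, '1' ≤ c ∧ c ≤ '9' := by
  intro c hc; rcases mem_digitChars_cases hc with rfl|rfl|rfl|rfl|rfl|rfl|rfl|rfl|rfl <;> decide
theorem cdigit_tok_mem : ∀ c ∈ digitChars, [c] ∈ charTokens := by
  intro c hc; rcases mem_digitChars_cases hc with rfl|rfl|rfl|rfl|rfl|rfl|rfl|rfl|rfl <;>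
    simp [charTokens]
theorem cword_head : ∀ l ∈ charWords, ∀ c ∈ digitChars, l.head? ≠ some c := by
  intro l hl c hc
  rcases mem_charWords_cases hl with rfl|rfl|rfl|rfl|rfl|rfl|rfl|rfl|rfl <;>
    rcases mem_digitChars_cases hc with rfl|rfl|rfl|rfl|rfl|rfl|rfl|rfl|rfl <;> decide
theorem toks_ne_nil : ∀ t ∈ pyDigits, t.toList ≠ [] :=
  fun t ht => ctoks_ne_nil t.toList (toList_mem_charTokens ht)
theorem toks_prefix_free :
    ∀ t1 ∈ pyDigits, ∀ t2 ∈ pyDigits, t1.toList <+: t2.toList → t1 = t2 :=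
  fun t1 h1 t2 h2 hp =>
    toList_inj (ctoks_prefix_free _ (toList_mem_charTokens h1) _ (toList_mem_charTokens h2) hp)
theorem words_sub : ∀ w ∈ altWords, w ∈ pyDigits := by
  intro w hw
  obtain ⟨t, ht, htl⟩ := of_charTokens_mem (cwords_sub _ (toList_mem_charWords hw))
  exact (toList_inj htl) ▸ ht
theorem uniq_prefix {s : List Char} {t1 t2 : String} (h1 : t1 ∈ pyDigits) (h2 : t2 ∈ pyDigits)
    (p1 : t1.toList <+: s) (p2 : t2.toList <+: s) : t1 = t2 := by
  rcases List.prefix_or_prefix_of_prefix p1 p2 with h | h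
  · exact toks_prefix_free t1 h1 t2 h2 h
  · exact (toks_prefix_free t2 h2 t1 h1 h).symm

theorem char_digit_mem (c : Char) (h1 : '1' ≤ c) (h2 : c ≤ '9') : c ∈ digitChars := by
  rw [Char.le_def] at h1 h2
  have h1' : 49 ≤ c.toNat := h1
  have h2' : c.toNat ≤ 57 := h2
  have hor : c.toNat = 49 ∨ c.toNat = 50 ∨ c.toNat = 51 ∨ c.toNat = 52 ∨ c.toNat = 53 ∨
      c.toNat = 54 ∨ c.toNat = 55 ∨ c.toNat = 56 ∨ c.toNat = 57 := by omega
  rcases hor with h | h | h | h | h | h | h | h | h <;>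
    · rw [← Char.ofNat_toNat c, h]; decide

-- ---- facts about PySem.Chars.find ----
theorem infix_of_prefix_drop {sub s : List Char} {j : Nat} (h : sub <+: s.drop j) : sub <:+: s :=
  h.isInfix.trans (List.drop_suffix j s).isInfix

theorem exists_prefix_drop_of_infix {sub s : List Char} (h : sub <:+: s) :
    ∃ j, sub <+: s.drop j :=
  (PySem.Chars.exists_prefix_drop_iff_isIn sub s).mpr ((PySem.Chars.isIn_iff_infix sub s).mpr h)

theorem find_eq_of {s sub : List Char} {k : Nat} (h1 : sub <+: s.drop k)
    (h2 : ∀ i < k, ¬ sub <+: s.drop i) : PySem.Chars.find s sub = k := by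
  have h0 : 0 ≤ PySem.Chars.find s sub :=
    (PySem.Chars.find_nonneg_iff s sub).mpr (infix_of_prefix_drop h1)
  obtain ⟨hp, hmin⟩ := PySem.Chars.find_spec h0
  have hle : (PySem.Chars.find s sub).toNat ≤ k := by
    by_contra hlt
    exact hmin k (by omega) h1
  have hge : k ≤ (PySem.Chars.find s sub).toNat := by
    by_contra hlt
    exact h2 _ (by omega) hp
  omega

theorem find_cons {c : Char} {s sub : List Char} (h : ¬ sub <+: (c :: s)) :
    PySem.Chars.find (c :: s) sub =
      if PySem.Chars.find s sub = -1 then -1 else PySem.Chars.find s sub + 1 := by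
  by_cases hf : PySem.Chars.find s sub = -1
  · rw [if_pos hf]
    rw [PySem.Chars.find_eq_neg_one_iff] at hf ⊢
    intro hinf
    obtain ⟨j, hj⟩ := exists_prefix_drop_of_infix hinf
    cases j with
    | zero => exact h (by simpa using hj)
    | succ j => exact hf (infix_of_prefix_drop (sub := sub) (s := s) (j := j) (by simpa using hj))
  · rw [if_neg hf]
    have h0 : 0 ≤ PySem.Chars.find s sub := by
      have := PySem.Chars.neg_one_le_find s sub; omega
    obtain ⟨hp, hmin⟩ := PySem.Chars.find_spec h0
    have heq : PySem.Chars.find (c :: s) sub = (((PySem.Chars.find s sub).toNat + 1 : Nat) : Int) := by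
      apply find_eq_of
      · simpa using hp
      · intro i hi
        cases i with
        | zero => simpa using h
        | succ i => intro hpi; exact hmin i (by omega) (by simpa using hpi)
    rw [heq]
    push_cast
    omega

-- ---- port A as a fold with an explicit step function ----
def stepA (s : List Char) (st : Int × String) (d : String) : Int × String :=
  let p := PySem.Chars.find s d.toList
  if 0 ≤ p ∧ p < st.1 then (p, d) else st

theorem A_unfold (line : String) :
    getFirstDigitIn line = (pyDigits.foldl (stepA line.toList) ((99999 : Int), "")).2 := by
  unfold getFirstDigitIn stepA
  simp only [PySem.Str.find_eq]

theorem fold_stepA_zero (s : List Char) (ts : List String) (res : String) :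
    ts.foldl (stepA s) ((0 : Int), res) = (0, res) := by
  induction ts with
  | nil => rfl
  | cons d ts ih =>
    rw [List.foldl_cons]
    have hstep : stepA s ((0 : Int), res) d = (0, res) := by
      simp only [stepA]
      rw [if_neg]
      rintro ⟨hh1, hh2⟩
      omega
    rw [hstep, ih]

theorem fold_stepA_const (s : List Char) (ts : List String) (pos : Int) (res : String)
    (h : ∀ t ∈ ts, ¬ (0 ≤ PySem.Chars.find s t.toList ∧ PySem.Chars.find s t.toList < pos)) :
    ts.foldl (stepA s) (pos, res) = (pos, res) := by
  induction ts with
  | nil => rfl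
  | cons d ts ih =>
    rw [List.foldl_cons]
    have hstep : stepA s (pos, res) d = (pos, res) := by
      simp only [stepA]
      rw [if_neg (h d List.mem_cons_self)]
    rw [hstep]
    exact ih (fun t ht => h t (List.mem_cons_of_mem _ ht))

theorem fold_stepA_unique_zero (s : List Char) :
    ∀ (ts : List String) (pos : Int) (res t0 : String),
      0 < pos → t0 ∈ ts → PySem.Chars.find s t0.toList = 0 →
      (∀ t ∈ ts, PySem.Chars.find s t.toList = 0 → t = t0) →
      (ts.foldl (stepA s) (pos, res)).2 = t0 := by
  intro ts
  induction ts with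
  | nil => intro pos res t0 _ hmem; exact absurd hmem (List.not_mem_nil)
  | cons d ts ih =>
    intro pos res t0 hpos hmem h0 huniq
    rw [List.foldl_cons]
    by_cases hd : PySem.Chars.find s d.toList = 0
    · have hdt : d = t0 := huniq d List.mem_cons_self hd
      have hstep : stepA s (pos, res) d = (0, d) := by
        simp only [stepA]
        rw [hd, if_pos ⟨le_refl (0 : Int), hpos⟩]
      rw [hstep, hdt, fold_stepA_zero]
    · have hmem' : t0 ∈ ts := by
        rcases List.mem_cons.mp hmem with h | h
        · exact absurd (h ▸ h0) hd
        · exact h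
      have huniq' : ∀ t ∈ ts, PySem.Chars.find s t.toList = 0 → t = t0 :=
        fun t ht => huniq t (List.mem_cons_of_mem _ ht)
      simp only [stepA]
      split
      · next hcond =>
        exact ih _ _ _ (lt_of_le_of_ne hcond.1 (Ne.symm hd)) hmem' h0 huniq'
      · next =>
        exact ih _ _ _ hpos hmem' h0 huniq'

theorem fold_stepA_shift (c : Char) (s : List Char) :
    ∀ (ts : List String), (∀ t ∈ ts, ¬ t.toList <+: (c :: s)) →
      ∀ (pos : Int) (res : String),
        ts.foldl (stepA (c :: s)) (pos + 1, res) =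
          ((ts.foldl (stepA s) (pos, res)).1 + 1, (ts.foldl (stepA s) (pos, res)).2) := by
  intro ts
  induction ts with
  | nil => intro _ pos res; rfl
  | cons d ts ih =>
    intro h0 pos res
    have hfc := find_cons (h0 d List.mem_cons_self)
    have htail : ∀ t ∈ ts, ¬ t.toList <+: (c :: s) := fun t ht => h0 t (List.mem_cons_of_mem _ ht)
    rw [List.foldl_cons, List.foldl_cons]
    by_cases hneg : PySem.Chars.find s d.toList = -1
    · have hA : stepA (c :: s) (pos + 1, res) d = (pos + 1, res) := by
        simp only [stepA]
        rw [hfc, if_pos hneg, if_neg (by rintro ⟨hh1, _⟩; omega)]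
      have hB : stepA s (pos, res) d = (pos, res) := by
        simp only [stepA]
        rw [if_neg (by rintro ⟨hh1, _⟩; rw [hneg] at hh1; omega)]
      rw [hA, hB, ih htail]
    · have hge : 0 ≤ PySem.Chars.find s d.toList := by
        have := PySem.Chars.neg_one_le_find s d.toList; omega
      by_cases hlt : PySem.Chars.find s d.toList < pos
      · have hA : stepA (c :: s) (pos + 1, res) d = (PySem.Chars.find s d.toList + 1, d) := by
          simp only [stepA]
          rw [hfc, if_neg hneg, if_pos ⟨by omega, by omega⟩]
        have hB : stepA s (pos, res) d = (PySem.Chars.find s d.toList, d) := by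
          simp only [stepA]
          rw [if_pos ⟨hge, hlt⟩]
        rw [hA, hB, ih htail]
      · have hA : stepA (c :: s) (pos + 1, res) d = (pos + 1, res) := by
          simp only [stepA]
          rw [hfc, if_neg hneg, if_neg (by rintro ⟨_, hh2⟩; omega)]
        have hB : stepA s (pos, res) d = (pos, res) := by
          simp only [stepA]
          rw [if_neg (by rintro ⟨_, hh2⟩; omega)]
        rw [hA, hB, ih htail]

-- ---- the semantic left-to-right scan (structural form of port B) ----
def scanSem : List Char → String
  | [] => ""
  | c :: rest =>
    if '1' ≤ c ∧ c ≤ '9' then String.ofList [c]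
    else
      match altWords.find? (fun w => PySem.Chars.startswith (c :: rest) w.toList) with
      | some w => w
      | none => scanSem rest

theorem altGo_eq (s : List Char) : ∀ (k i : Nat), s.length - i ≤ k →
    altGo s s.length i = scanSem (s.drop i) := by
  intro k
  induction k with
  | zero =>
    intro i hki
    have hle : s.length ≤ i := by omega
    rw [altGo, dif_neg (by omega), List.drop_eq_nil_of_le hle]
    rfl
  | succ k ih =>
    intro i hki
    by_cases hi : i < s.length
    · rw [altGo, dif_pos hi]
      have hgetD : s.getD i ' ' = s[i] := List.getD_eq_getElem s ' ' hi
      have hdrop : s.drop i = s[i] :: s.drop (i + 1) := List.drop_eq_getElem_cons hi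
      rw [hdrop]
      simp only [hgetD, scanSem]
      by_cases hd : '1' ≤ s[i] ∧ s[i] ≤ '9'
      · rw [if_pos hd, if_pos hd]
      · rw [if_neg hd, if_neg hd]
        cases hfw : altWords.find?
            (fun w => PySem.Chars.startswith (s[i] :: s.drop (i + 1)) w.toList) with
        | some w => rfl
        | none => exact ih (i + 1) (by omega)
    · have hle : s.length ≤ i := by omega
      rw [altGo, dif_neg (by omega), List.drop_eq_nil_of_le hle]
      rfl

theorem scanSem_cons_no_match (c : Char) (rest : List Char)
    (h : ∀ t ∈ pyDigits, ¬ t.toList <+: (c :: rest)) :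
    scanSem (c :: rest) = scanSem rest := by
  have hdig : ¬ ('1' ≤ c ∧ c ≤ '9') := by
    rintro ⟨h1, h2⟩
    have hc : c ∈ digitChars := char_digit_mem c h1 h2
    obtain ⟨t, ht, htl⟩ := of_charTokens_mem (cdigit_tok_mem c hc)
    refine h t ht ?_
    rw [htl]
    exact ⟨rest, rfl⟩
  have hfind : altWords.find? (fun w => PySem.Chars.startswith (c :: rest) w.toList) = none := by
    rw [List.find?_eq_none]
    intro w hw hsw
    exact h w (words_sub w hw) ((PySem.Chars.startswith_iff _ _).mp hsw)
  simp only [scanSem]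
  rw [if_neg hdig, hfind]

theorem scanSem_match_zero (s : List Char) (t0 : String) (ht0 : t0 ∈ pyDigits)
    (hp : t0.toList <+: s) : scanSem s = t0 := by
  cases s with
  | nil => exact absurd (List.prefix_nil.mp hp) (toks_ne_nil t0 ht0)
  | cons c rest =>
    rcases ctoks_shape t0.toList (toList_mem_charTokens ht0) with hword | hdig
    · -- t0 is one of the words; the char c is then not a digit 1..9
      have hdig : ¬ ('1' ≤ c ∧ c ≤ '9') := by
        rintro ⟨h1, h2⟩
        have hc : c ∈ digitChars := char_digit_mem c h1 h2
        obtain ⟨l, hl⟩ := hp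
        cases ht0l : t0.toList with
        | nil => exact toks_ne_nil t0 ht0 ht0l
        | cons a tl =>
          rw [ht0l] at hl
          have ha : a = c := by injection hl
          exact cword_head t0.toList hword c hc (by rw [ht0l, List.head?_cons, ha])
      have hsome : (altWords.find? (fun w => PySem.Chars.startswith (c :: rest) w.toList)).isSome := by
        rw [List.find?_isSome]
        obtain ⟨w0, hw0, hwtl⟩ := of_charWords_mem hword
        exact ⟨w0, hw0, (PySem.Chars.startswith_iff _ _).mpr (by rw [hwtl]; exact hp)⟩
      obtain ⟨w, hwsome⟩ := Option.isSome_iff_exists.mp hsome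
      have hpw := List.find?_some
        (p := fun (w : String) => PySem.Chars.startswith (c :: rest) w.toList) hwsome
      have hwp : w.toList <+: (c :: rest) := (PySem.Chars.startswith_iff _ _).mp hpw
      have hwmem : w ∈ pyDigits := words_sub w (List.mem_of_find?_eq_some hwsome)
      have hwt : w = t0 := uniq_prefix hwmem ht0 hwp hp
      simp only [scanSem]
      rw [if_neg hdig, hwsome]
      exact hwt
    · -- t0 is a single digit character
      obtain ⟨a, hmem, ht0l⟩ := hdig
      rw [ht0l] at hp
      obtain ⟨l, hl⟩ := hp
      have hac : a = c := by injection hl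
      obtain ⟨hb1, hb2⟩ := digitChars_bounds a hmem
      simp only [scanSem]
      rw [if_pos ⟨hac ▸ hb1, hac ▸ hb2⟩]
      have ht0e : t0 = String.ofList [a] := by
        rw [← String.ofList_toList (s := t0), ht0l]
      rw [ht0e, hac]

-- ---- the key bridge: A's capped minimum fold equals the left-to-right scan ----
theorem fold_eq_scan :
    ∀ (s : List Char) (N : Int),
      ((∃ i : Nat, (i : Int) < N ∧ ∃ t ∈ pyDigits, t.toList <+: s.drop i) ∨
       (∀ i : Nat, ¬ ∃ t ∈ pyDigits, t.toList <+: s.drop i)) →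
      (pyDigits.foldl (stepA s) (N, "")).2 = scanSem s := by
  intro s
  induction s with
  | nil =>
    intro N _
    have harg : ∀ t ∈ pyDigits,
        ¬ (0 ≤ PySem.Chars.find ([] : List Char) t.toList ∧
           PySem.Chars.find ([] : List Char) t.toList < N) := by
      intro t ht hc
      have hinf : t.toList <:+: ([] : List Char) := by
        rw [← PySem.Chars.find_nonneg_iff]
        exact hc.1
      exact toks_ne_nil t ht (List.infix_nil.mp hinf)
    rw [fold_stepA_const _ _ _ _ harg]
    rfl
  | cons c rest ih =>
    intro N hN
    by_cases h0 : ∃ t0 ∈ pyDigits, t0.toList <+: (c :: rest)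
    · obtain ⟨t0, ht0, hp0⟩ := h0
      have hNpos : 0 < N := by
        rcases hN with ⟨i, hi, _⟩ | hall
        · have : (0 : Int) ≤ (i : Int) := Int.natCast_nonneg i
          omega
        · exact absurd ⟨t0, ht0, by simpa using hp0⟩ (hall 0)
      have hf0 : PySem.Chars.find (c :: rest) t0.toList = 0 := by
        have := find_eq_of (s := c :: rest) (sub := t0.toList) (k := 0)
          (by simpa using hp0) (fun i hi => absurd hi (Nat.not_lt_zero i))
        simpa using this
      have huniq : ∀ t ∈ pyDigits, PySem.Chars.find (c :: rest) t.toList = 0 → t = t0 := by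
        intro t ht hft
        have h0' : 0 ≤ PySem.Chars.find (c :: rest) t.toList := hft ▸ le_refl (0 : Int)
        obtain ⟨hpt, _⟩ := PySem.Chars.find_spec h0'
        rw [hft] at hpt
        exact uniq_prefix ht ht0 (by simpa using hpt) hp0
      rw [fold_stepA_unique_zero (c :: rest) pyDigits N "" t0 hNpos ht0 hf0 huniq,
        scanSem_match_zero (c :: rest) t0 ht0 hp0]
    · push_neg at h0
      have hsh := fold_stepA_shift c rest pyDigits h0 (N - 1) ""
      have hN1 : N - 1 + 1 = N := by ring
      rw [hN1] at hsh
      rw [hsh, scanSem_cons_no_match c rest h0]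
      apply ih (N - 1)
      rcases hN with ⟨i, hi, t, ht, hp⟩ | hall
      · cases i with
        | zero => exact absurd hp (h0 t ht)
        | succ j =>
          left
          refine ⟨j, by push_cast at hi ⊢; omega, t, ht, by simpa using hp⟩
      · right
        rintro j ⟨t, ht, hp⟩
        exact hall (j + 1) ⟨t, ht, by simpa using hp⟩

-- ---- the two ports through the bridge ----
theorem alt_eq_scan (line : String) : getFirstDigitIn_alt line = scanSem line.toList := by
  unfold getFirstDigitIn_alt
  rw [altGo_eq line.toList line.toList.length 0 (by omega), List.drop_zero]

-- ===== VERDICT (by name: the statement is the Claim_ definition above) =====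
theorem getFirstDigitIn_spec : Claim_equal_getFirstDigitIn := by
  unfold Claim_equal_getFirstDigitIn
  intro line _hdom hpre
  unfold Spec_getFirstDigitIn
  rw [A_unfold, alt_eq_scan]
  apply fold_eq_scan
  rcases hpre with ⟨i, hi, t, ht, hp⟩ | hnone
  · left
    exact ⟨i, by have := lt_min_iff.mp hi; exact_mod_cast this.1, t, ht, hp⟩
  · right
    rintro i ⟨t, ht, hp⟩
    have hlen : i < line.toList.length := by
      by_contra hge
      push_neg at hge
      rw [List.drop_eq_nil_of_le hge] at hp
      exact toks_ne_nil t ht (List.prefix_nil.mp hp)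
    exact hnone i hlen t ht hp
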